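-- pv_equiv track=rewrite | github.com/Aminvp/maktab | HW_1/Amirhossein_Hakimelahi_hw1_maktab60/Amirhossein_Hakimelahi_hw1_maktab60/first.py | is_ord_sub
-- ===== SOURCE A (Python) =====
-- def is_ord_sub(smlst, biglst):
--     index = -1
--     for item in smlst:
--         try:
--             index = biglst.index(item, index + 1)
--         except:
--             return False
--     return True
-- ===== SOURCE B (Python) =====
-- def is_ord_sub(smlst, biglst):
--     pos = {}
--     for i, v in enumerate(biglst):
--         pos.setdefault(v, []).append(i)
--     prev = -1
--     for item in smlst:
--         lst = pos.get(item, [])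
--         lo, hi = 0, len(lst)
--         while lo < hi:
--             mid = (lo + hi) // 2
--             if lst[mid] <= prev:
--                 lo = mid + 1
--             else:
--                 hi = mid
--         if lo == len(lst):
--             return False
--         prev = lst[lo]
--     return True
-- ===== Notes on version B (the rewrite author's own statement) =====
-- stated objective: alternative
-- what changed: B precomputes a hash index mapping each value to its sorted list of positions in biglst in one pass, then answers each smlst item by binary-searching that list for the first position past the previous match, instead of A's greedy scan with repeated list.index calls from an advancing index inside try/except.
import Mathlib
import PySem

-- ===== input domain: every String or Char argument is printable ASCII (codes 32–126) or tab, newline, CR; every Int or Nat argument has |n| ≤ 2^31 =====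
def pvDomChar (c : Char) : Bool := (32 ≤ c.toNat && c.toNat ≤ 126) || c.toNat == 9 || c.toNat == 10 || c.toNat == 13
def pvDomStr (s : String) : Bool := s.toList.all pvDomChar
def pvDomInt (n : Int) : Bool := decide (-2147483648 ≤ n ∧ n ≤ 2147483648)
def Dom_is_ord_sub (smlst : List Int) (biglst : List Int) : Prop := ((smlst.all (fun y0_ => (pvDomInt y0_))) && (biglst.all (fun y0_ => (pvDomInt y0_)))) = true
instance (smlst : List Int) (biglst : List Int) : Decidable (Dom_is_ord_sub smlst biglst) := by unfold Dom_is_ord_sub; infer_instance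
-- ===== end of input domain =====

-- B: builds a value-to-positions index in one pass and binary-searches each item's next position, instead of A's greedy scan with repeated list.index; alternative algorithm, similar cost.


-- ===== PORT A =====
-- loop over smlst, maintaining the Int index; biglst.index(item, index+1) ported by hand:
-- search the suffix biglst.drop (index+1) (exact: index+1 is always ≥ 0 here) and re-base the result.
def isOrdSubGoA (biglst : List Int) : List Int → Int → Bool
  | [], _ => true
  | item :: rest, index =>
    match PySem.List.index? (biglst.drop (index + 1).toNat) item with
    | none => false                                   -- ValueError caught by the bare except
    | some k => isOrdSubGoA biglst rest (index + 1 + k)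

def is_ord_sub (smlst : List Int) (biglst : List Int) : Bool :=
  isOrdSubGoA biglst smlst (-1)

-- ===== PORT B =====
-- pos = {}; for i, v in enumerate(biglst): pos.setdefault(v, []).append(i)
def pvBuildPos (biglst : List Int) : PySem.Dict Int (List Int) :=
  (PySem.List.enumerate biglst).foldl (fun d p => d.modify p.2 [] (· ++ [p.1])) PySem.Dict.empty

-- the while-loop binary search; lst[mid] is always in range when called with hi ≤ len(lst), where List.getD is exact
def pvBisect (lst : List Int) (prev : Int) (lo hi : Nat) : Nat :=
  if lo < hi then
    let mid := (lo + hi) / 2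
    if lst.getD mid 0 ≤ prev then pvBisect lst prev (mid + 1) hi else pvBisect lst prev lo mid
  else lo
termination_by hi - lo
decreasing_by all_goals omega

-- the for-loop over smlst, maintaining prev (position of the previous match, initially -1)
def pvGoB (pos : PySem.Dict Int (List Int)) : List Int → Int → Bool
  | [], _ => true
  | item :: rest, prev =>
    let lst := pos.getD item []
    let lo := pvBisect lst prev 0 lst.length
    if lo = lst.length then false else pvGoB pos rest (lst.getD lo 0)

def is_ord_sub_alt (smlst : List Int) (biglst : List Int) : Bool :=
  pvGoB (pvBuildPos biglst) smlst (-1)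

-- ===== PRECONDITION & SPEC =====
def Spec_is_ord_sub (smlst : List Int) (biglst : List Int) (out : Bool) : Prop := out = is_ord_sub_alt smlst biglst
instance (smlst : List Int) (biglst : List Int) (out : Bool) : Decidable (Spec_is_ord_sub smlst biglst out) := by unfold Spec_is_ord_sub; infer_instance

-- ===== CLAIM (what is proved, stated in full; the proofs are below) =====
def Claim_equal_is_ord_sub : Prop := ∀ (smlst : List Int) (biglst : List Int), Dom_is_ord_sub smlst biglst → Spec_is_ord_sub smlst biglst (is_ord_sub smlst biglst)

-- ===== LEMMAS AND PROOFS =====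

-- positions (as Ints) of v in l, indices counted from s: the contents of pvBuildPos's lists
def posnsFrom (v : Int) : Int → List Int → List Int
  | _, [] => []
  | s, x :: xs => if x = v then s :: posnsFrom v (s + 1) xs else posnsFrom v (s + 1) xs

theorem filter_map_enum (v : Int) : ∀ (l : List Int) (s : Int),
    ((((PySem.List.enumerate l s).map (fun p => (p.2, p.1))).filter (fun p => p.1 == v)).map (·.2)) = posnsFrom v s l := by
  intro l
  induction l with
  | nil => intro s; simp [PySem.List.enumerate_nil, posnsFrom]
  | cons x xs ih =>
    intro s
    rw [PySem.List.enumerate_cons]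
    simp only [List.map_cons, List.filter_cons, posnsFrom]
    by_cases h : x = v
    · simp [h, ih]
    · simp [h, ih]

theorem buildPos_getD (biglst : List Int) (v : Int) :
    (pvBuildPos biglst).getD v [] = posnsFrom v 0 biglst := by
  unfold pvBuildPos
  have h : (PySem.List.enumerate biglst).foldl (fun d p => d.modify p.2 [] (· ++ [p.1])) PySem.Dict.empty
      = ((PySem.List.enumerate biglst).map (fun p => (p.2, p.1))).foldl (fun d p => d.modify p.1 [] (· ++ [p.2])) PySem.Dict.empty := by
    rw [List.foldl_map]
  rw [h, PySem.Dict.getD_foldl_modify_append]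
  simpa using filter_map_enum v biglst 0

theorem posnsFrom_ge (v : Int) : ∀ (s : Int) (l : List Int) (x : Int), x ∈ posnsFrom v s l → s ≤ x := by
  intro s l
  induction l generalizing s with
  | nil => intro x h; simp [posnsFrom] at h
  | cons y ys ih =>
    intro x h
    simp only [posnsFrom] at h
    split at h
    · rcases List.mem_cons.1 h with rfl | h
      · omega
      · have := ih (s+1) x h; omega
    · have := ih (s+1) x h; omega

theorem posnsFrom_pairwise (v : Int) : ∀ (s : Int) (l : List Int), (posnsFrom v s l).Pairwise (· < ·) := by
  intro s l
  induction l generalizing s with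
  | nil => simp [posnsFrom]
  | cons y ys ih =>
    simp only [posnsFrom]
    split
    · exact List.Pairwise.cons (fun x hx => by have := posnsFrom_ge v (s+1) ys x hx; omega) (ih (s+1))
    · exact ih (s+1)

theorem find?_congr_mem {α : Type} (p q : α → Bool) : ∀ (l : List α), (∀ x ∈ l, p x = q x) → l.find? p = l.find? q := by
  intro l
  induction l with
  | nil => intro _; rfl
  | cons x xs ih =>
    intro h
    simp only [List.find?]
    rw [h x (by simp)]
    cases q x
    · exact ih (fun y hy => h y (by simp [hy]))
    · rfl

-- find? on the positions list = index? on the dropped suffix, rebased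
theorem posnsFrom_find? (v : Int) : ∀ (l : List Int) (s t : Int), s ≤ t →
    (posnsFrom v s l).find? (fun x => decide (t ≤ x)) =
      (PySem.List.index? (l.drop (t - s).toNat) v).map (fun k => t + k) := by
  intro l
  induction l with
  | nil => intro s t _; simp [posnsFrom, PySem.List.index?_eq_idxOf?]
  | cons x xs ih =>
    intro s t hst
    by_cases h : s < t
    · have hdrop : (x :: xs).drop (t - s).toNat = xs.drop (t - (s+1)).toNat := by
        have : (t - s).toNat = (t - (s+1)).toNat + 1 := by omega
        rw [this]; rfl
      rw [hdrop]
      simp only [posnsFrom]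
      split
      · rw [List.find?]
        have hd : decide (t ≤ s) = false := by simp; omega
        simp only [hd]
        exact ih (s+1) t (by omega)
      · exact ih (s+1) t (by omega)
    · have hts : t = s := by omega
      subst hts
      have h0 : (t - t).toNat = 0 := by omega
      rw [h0, List.drop_zero]
      simp only [posnsFrom]
      by_cases hxv : x = v
      · subst hxv
        rw [if_pos rfl, List.find?]
        have hd : decide (t ≤ t) = true := by simp
        simp only [hd, PySem.List.index?_cons_self]
        simp
      · rw [if_neg hxv, PySem.List.index?_cons_of_ne xs hxv]
        have hcongr : (posnsFrom v (t+1) xs).find? (fun x => decide (t ≤ x))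
            = (posnsFrom v (t+1) xs).find? (fun x => decide (t+1 ≤ x)) := by
          apply find?_congr_mem
          intro y hy
          have := posnsFrom_ge v (t+1) xs y hy
          simp; omega
        rw [hcongr, ih (t+1) (t+1) le_rfl]
        have h0' : (t + 1 - (t+1)).toNat = 0 := by omega
        rw [h0', List.drop_zero]
        cases PySem.List.index? xs v
        · rfl
        · simp; omega

theorem pairwise_getD_mono (lst : List Int) (hs : lst.Pairwise (· < ·)) :
    ∀ i j, i ≤ j → j < lst.length → lst.getD i 0 ≤ lst.getD j 0 := by
  intro i j hij hj
  rcases Nat.eq_or_lt_of_le hij with rfl | hlt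
  · exact le_rfl
  · have := (List.pairwise_iff_getElem.1 hs) i j (by omega) hj hlt
    rw [List.getD_eq_getElem _ _ (by omega), List.getD_eq_getElem _ _ hj]
    omega

-- binary-search invariant: result r has everything below ≤ prev and everything from r on > prev
theorem pvBisect_inv (lst : List Int) (prev : Int) (hs : lst.Pairwise (· < ·)) :
    ∀ (n lo hi : Nat), hi - lo ≤ n → lo ≤ hi → hi ≤ lst.length →
      (∀ i, i < lo → lst.getD i 0 ≤ prev) →
      (∀ i, hi ≤ i → i < lst.length → prev < lst.getD i 0) →
      lo ≤ pvBisect lst prev lo hi ∧ pvBisect lst prev lo hi ≤ hi ∧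
      (∀ i, i < pvBisect lst prev lo hi → lst.getD i 0 ≤ prev) ∧
      (∀ i, pvBisect lst prev lo hi ≤ i → i < lst.length → prev < lst.getD i 0) := by
  intro n
  induction n with
  | zero =>
    intro lo hi hn hlo hhi hlow hhigh
    have : lo = hi := by omega
    subst this
    rw [pvBisect, if_neg (by omega)]
    exact ⟨le_rfl, le_rfl, hlow, hhigh⟩
  | succ n ih =>
    intro lo hi hn hlo hhi hlow hhigh
    by_cases hlt : lo < hi
    · rw [pvBisect, if_pos hlt]
      simp only
      set mid := (lo + hi) / 2 with hmid
      have hmr : lo ≤ mid ∧ mid < hi := by omega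
      by_cases hle : lst.getD mid 0 ≤ prev
      · rw [if_pos hle]
        obtain ⟨h1, h2, h3, h4⟩ := ih (mid + 1) hi (by omega) (by omega) hhi
          (fun i hi' => by
            have : lst.getD i 0 ≤ lst.getD mid 0 := pairwise_getD_mono lst hs i mid (by omega) (by omega)
            omega)
          hhigh
        exact ⟨by omega, h2, h3, h4⟩
      · rw [if_neg hle]
        obtain ⟨h1, h2, h3, h4⟩ := ih lo mid (by omega) (by omega) (by omega) hlow
          (fun i hi' hilen => by
            have : lst.getD mid 0 ≤ lst.getD i 0 := pairwise_getD_mono lst hs mid i (by omega) hilen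
            omega)
        exact ⟨h1, by omega, h3, h4⟩
    · have heq : lo = hi := by omega
      subst heq
      rw [pvBisect, if_neg hlt]
      exact ⟨le_rfl, le_rfl, hlow, hhigh⟩

-- find? characterised by a split point
theorem find?_char (p : Int → Bool) : ∀ (lst : List Int) (r : Nat), r ≤ lst.length →
    (∀ i, i < r → p (lst.getD i 0) = false) →
    (∀ i, r ≤ i → i < lst.length → p (lst.getD i 0) = true) →
    lst.find? p = lst[r]? := by
  intro lst
  induction lst with
  | nil => intro r hr _ _; have : r = 0 := by simpa using hr
           subst this; simp
  | cons x xs ih =>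
    intro r hr hlow hhigh
    cases r with
    | zero =>
      have hx : p x = true := by have := hhigh 0 (by omega) (by simp); simpa using this
      simp [List.find?, hx]
    | succ r' =>
      have hx : p x = false := by have := hlow 0 (by omega); simpa using this
      simp only [List.find?, hx]
      rw [ih r' (by simpa using hr) (fun i hi => by simpa using hlow (i+1) (by omega))
          (fun i hi hlen => by simpa using hhigh (i+1) (by omega) (by simpa using hlen))]
      simp

theorem main_eq (biglst : List Int) : ∀ (smlst : List Int) (prev : Int), -1 ≤ prev →
    isOrdSubGoA biglst smlst prev = pvGoB (pvBuildPos biglst) smlst prev := by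
  intro smlst
  induction smlst with
  | nil => intro prev _; rfl
  | cons item rest ih =>
    intro prev hprev
    rw [isOrdSubGoA, pvGoB]
    simp only [buildPos_getD]
    set lst := posnsFrom item 0 biglst with hlst
    set r := pvBisect lst prev 0 lst.length with hr
    obtain ⟨h0, hrlen, hbelow, habove⟩ := pvBisect_inv lst prev
      (posnsFrom_pairwise item 0 biglst) lst.length 0 lst.length (by omega) (by omega)
      le_rfl (by omega) (fun i h1 h2 => absurd h1 (by omega))
    have hfind : lst.find? (fun x => decide (prev + 1 ≤ x)) = lst[r]? := by
      apply find?_char _ lst r hrlen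
      · intro i hi2
        have := hbelow i hi2
        simp only [decide_eq_false_iff_not]
        omega
      · intro i hi2 hlen
        have := habove i hi2 hlen
        simp only [decide_eq_true_eq]
        omega
    have hkey := posnsFrom_find? item biglst 0 (prev + 1) (by omega)
    rw [show prev + 1 - 0 = prev + 1 by ring] at hkey
    rw [hfind] at hkey
    cases hidx : PySem.List.index? (biglst.drop (prev + 1).toNat) item with
    | none =>
      rw [hidx] at hkey
      simp at hkey
      simp [show r = lst.length from by omega]
    | some k =>
      rw [hidx] at hkey
      have hrlt : r < lst.length := by
        rcases Nat.lt_or_ge r lst.length with h | h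
        · exact h
        · rw [List.getElem?_eq_none h] at hkey; simp at hkey
      have hval : lst.getD r 0 = prev + 1 + k := by
        rw [List.getElem?_eq_getElem hrlt] at hkey
        simp at hkey
        rw [List.getD_eq_getElem _ _ hrlt, hkey]
      rw [if_neg (show ¬ r = lst.length from by omega), hval]
      exact ih (prev + 1 + k) (by omega)

-- ===== VERDICT (by name: the statement is the Claim_ definition above) =====
theorem is_ord_sub_spec : Claim_equal_is_ord_sub := by
  intro smlst biglst _
  unfold Spec_is_ord_sub is_ord_sub is_ord_sub_alt
  exact main_eq biglst smlst (-1) (by omega)
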